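-- pv_equiv track=rewrite | github.com/DanielDePaulaPorto/CIC-EstruturaDeDados | Exemplos/Recursao/Maximize.py | maximize
-- ===== SOURCE A (Python) =====
-- def maximize(x):
--     maximo = 0
--     maiorY = 0
--     for y in range(1,x):
--         resultoadoMDC = mdc(y,x)
--         soma = resultoadoMDC + y
--         if soma > maximo:
--             maximo = soma
--             maiorY = y
--     return maiorY
--
-- def mdc(a,b):
--     if b == 0:
--         return a
--     else:
--         return mdc(b,a%b)
-- ===== SOURCE B (Python) =====
-- def maximize(x):
--     # gcd(y, x) + y <= x for 1 <= y < x, with equality exactly at y = x - d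
--     # for proper divisors d of x; the first maximum is at x - (largest proper
--     # divisor) = x - x // (smallest factor >= 2 of x).
--     if x < 2:
--         return 0
--     i = 2
--     while i * i <= x:
--         if x % i == 0:
--             return x - x // i
--         i += 1
--     return x - 1
-- ===== Notes on version B (the rewrite author's own statement) =====
-- stated objective: faster
-- what changed: Replaces the O(x) scan computing gcd(y,x)+y for every y in [1,x) with a closed form: the answer is x minus the largest proper divisor of x, obtained by trial division for the smallest factor up to sqrt(x).
import Mathlib
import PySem

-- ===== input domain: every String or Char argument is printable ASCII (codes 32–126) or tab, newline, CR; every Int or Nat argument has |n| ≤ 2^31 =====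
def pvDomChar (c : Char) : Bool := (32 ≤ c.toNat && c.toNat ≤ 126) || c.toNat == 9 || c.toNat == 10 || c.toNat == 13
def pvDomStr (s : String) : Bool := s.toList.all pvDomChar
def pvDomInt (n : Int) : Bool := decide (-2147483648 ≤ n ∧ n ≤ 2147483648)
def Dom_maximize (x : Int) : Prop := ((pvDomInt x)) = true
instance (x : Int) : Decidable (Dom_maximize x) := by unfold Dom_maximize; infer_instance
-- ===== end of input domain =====

-- B replaces A's O(x) scan by a closed form: the answer is x minus its largest
-- proper divisor, found by trial division for the smallest factor (faster).

-- ===== PORT A =====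
-- mdc's Euclidean recursion, structurally on a fuel bound (|b| strictly
-- decreases, so |b|+1 steps always suffice; fuel 0 is never reached)
def mdcGo : Nat → Int → Int → Int
  | 0, a, _ => a
  | fuel + 1, a, b => if b = 0 then a else mdcGo fuel b (PySem.Int.mod a b)

def mdc (a b : Int) : Int := mdcGo (b.natAbs + 1) a b

def stepA (x : Int) (s : Int × Int) (y : Int) : Int × Int :=
  let resultoadoMDC := mdc y x
  let soma := resultoadoMDC + y
  if soma > s.1 then (soma, y) else s

def maximize (x : Int) : Int :=
  ((PySem.List.pyRange 1 x 1).foldl (stepA x) (0, 0)).2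

-- ===== PORT B =====
-- the trial-division while loop, structurally on a fuel bound (i grows
-- toward x while i*i ≤ x, so x steps always suffice; fuel 0 is never reached)
def spfGo : Nat → Int → Int → Int
  | 0, x, _ => x - 1
  | fuel + 1, x, i =>
    if i * i ≤ x then
      if PySem.Int.mod x i = 0 then x - PySem.Int.floordiv x i
      else spfGo fuel x (i + 1)
    else x - 1

def maximize_alt (x : Int) : Int :=
  if x < 2 then 0 else spfGo x.toNat x 2

-- ===== PRECONDITION & SPEC =====
def Spec_maximize (x : Int) (out : Int) : Prop := out = maximize_alt x
instance (x : Int) (out : Int) : Decidable (Spec_maximize x out) := by unfold Spec_maximize; infer_instance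

-- ===== CLAIM (what is proved, stated in full; the proofs are below) =====
def Claim_equal_maximize : Prop := ∀ (x : Int), Dom_maximize x → Spec_maximize x (maximize x)

-- ===== LEMMAS AND PROOFS =====

lemma stepA_eq (x : Int) (s : Int × Int) (y : Int) :
    stepA x s y = if mdc y x + y > s.1 then (mdc y x + y, y) else s := rfl

-- Euclid with Python's floor-mod equals Int.gcd on nonnegative arguments.
lemma mdcGo_eq_gcd : ∀ (fuel : Nat) (a b : Int), 0 ≤ a → 0 ≤ b → b.natAbs < fuel →
    mdcGo fuel a b = Int.gcd a b := by
  intro fuel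
  induction fuel with
  | zero => intro a b _ _ hf; omega
  | succ fuel ih =>
    intro a b ha hb hf
    by_cases h : b = 0
    · subst h
      rw [mdcGo, if_pos rfl, Int.gcd_zero_right]
      omega
    · rw [mdcGo, if_neg h]
      have hbpos : 0 < b := by omega
      rw [PySem.Int.mod_eq_emod_of_pos hbpos]
      have hmod0 : 0 ≤ a % b := Int.emod_nonneg a (by omega)
      have hlt : (a % b).natAbs < b.natAbs := by
        have := Int.emod_lt_of_pos a hbpos
        omega
      rw [ih b (a % b) hb hmod0 (by omega)]
      have h2 : (a % b).natAbs = a.natAbs % b.natAbs := by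
        have h1 : a % b = (a.natAbs : Int) % (b.natAbs : Int) := by
          congr 1 <;> omega
        rw [h1, ← Int.natCast_mod]
        omega
      show ((Int.gcd b (a % b) : Nat) : Int) = ((Int.gcd a b : Nat) : Int)
      congr 1
      show Nat.gcd b.natAbs (a % b).natAbs = Nat.gcd a.natAbs b.natAbs
      rw [h2, Nat.gcd_comm b.natAbs, ← Nat.gcd_rec, Nat.gcd_comm]

lemma mdc_eq_gcd (a b : Int) (ha : 0 ≤ a) (hb : 0 ≤ b) : mdc a b = Int.gcd a b :=
  mdcGo_eq_gcd (b.natAbs + 1) a b ha hb (by omega)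

-- an Int divides the (cast) gcd of two Ints it divides
lemma dvd_gcd_int (a b c : Int) (h1 : c ∣ a) (h2 : c ∣ b) : c ∣ (Int.gcd a b : Int) := by
  have hn : c.natAbs ∣ Nat.gcd a.natAbs b.natAbs :=
    Nat.dvd_gcd (Int.natAbs_dvd_natAbs.mpr h1) (Int.natAbs_dvd_natAbs.mpr h2)
  exact Int.natAbs_dvd.mp (Int.natCast_dvd_natCast.mpr hn)

-- the sum gcd(y,x)+y never exceeds x on 1 ≤ y < x
lemma sum_le (x y : Int) (hy : 1 ≤ y) (hyx : y < x) : (Int.gcd y x : Int) + y ≤ x := by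
  have hgy : (Int.gcd y x : Int) ∣ y := Int.gcd_dvd_left y x
  have hgx : (Int.gcd y x : Int) ∣ x := Int.gcd_dvd_right y x
  have hg1 : 1 ≤ (Int.gcd y x : Int) := by
    have : Int.gcd y x ≠ 0 := by
      intro h0
      have := Int.eq_zero_of_gcd_eq_zero_left h0
      omega
    omega
  obtain ⟨k, hk⟩ := hgy
  obtain ⟨m, hm⟩ := hgx
  have hkm : k < m := by nlinarith
  nlinarith

-- any proper divisor (≥ 1) of x is at most x / p, p the smallest factor ≥ 2
lemma proper_div_le (x p e : Int) (hx : 2 ≤ x) (hp2 : 2 ≤ p) (hpd : p ∣ x)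
    (hmin : ∀ q, 2 ≤ q → q ∣ x → p ≤ q) (he1 : 1 ≤ e) (hed : e ∣ x) (helt : e < x) :
    e ≤ x / p := by
  obtain ⟨k, hk⟩ := hed
  have hk1 : 1 ≤ k := by nlinarith
  have hkne : k ≠ 1 := by
    intro h
    subst h
    simp at hk
    omega
  have hk2 : 2 ≤ k := by omega
  have hkd : k ∣ x := ⟨e, by rw [hk]; ring⟩
  have hpk : p ≤ k := hmin k hk2 hkd
  have hdp : p * (x / p) = x := Int.mul_ediv_cancel' hpd
  have hdpos : 1 ≤ x / p := by nlinarith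
  nlinarith

-- the fold keeps the running maximum below x while all sums are below x
lemma fold_lt (x : Int) (l : List Int) (h : ∀ y ∈ l, mdc y x + y < x) :
    ∀ s : Int × Int, s.1 < x → ((l.foldl (stepA x) s).1 < x) := by
  induction l with
  | nil => intro s hs; simpa using hs
  | cons y t ih =>
    intro s hs
    simp only [List.foldl_cons]
    apply ih (fun z hz => h z (List.mem_cons_of_mem _ hz))
    rw [stepA_eq]
    split
    · exact h y List.mem_cons_self
    · exact hs

-- once the maximum x is reached, no later y changes the state
lemma fold_const (x j : Int) (l : List Int) (h : ∀ y ∈ l, mdc y x + y ≤ x) :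
    l.foldl (stepA x) (x, j) = (x, j) := by
  induction l with
  | nil => rfl
  | cons y t ih =>
    simp only [List.foldl_cons]
    have hy := h y List.mem_cons_self
    rw [stepA_eq, if_neg (by simp only []; omega)]
    exact ih (fun z hz => h z (List.mem_cons_of_mem _ hz))

-- i*i ≤ x forces i ≤ x (so the fuel bound keeps decreasing)
lemma le_of_sq_le (i x : Int) (h : i * i ≤ x) : i ≤ x := by
  nlinarith [mul_self_nonneg i]

-- the trial-division loop: its result is x - x / p for the smallest factor p of x
lemma spfGo_spec (x : Int) (hx : 2 ≤ x) :
    ∀ (fuel : Nat) (i : Int), 2 ≤ i → (x + 1 - i).toNat < fuel →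
    (∀ q, 2 ≤ q → q < i → ¬ q ∣ x) →
    ∃ p, 2 ≤ p ∧ p ∣ x ∧ (∀ q, 2 ≤ q → q ∣ x → p ≤ q) ∧ spfGo fuel x i = x - x / p := by
  intro fuel
  induction fuel with
  | zero => intro i _ hf _; omega
  | succ fuel ih =>
    intro i hi2 hf hnd
    by_cases hle : i * i ≤ x
    · by_cases hdvd : PySem.Int.mod x i = 0
      · refine ⟨i, hi2, ?_, ?_, ?_⟩
        · exact (PySem.Int.mod_eq_zero_iff_dvd x i).mp hdvd
        · intro q hq2 hqd
          by_contra hlt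
          exact hnd q hq2 (by omega) hqd
        · rw [spfGo, if_pos hle, if_pos hdvd,
              PySem.Int.floordiv_eq_ediv_of_pos (by omega)]
      · have hix : i ≤ x := le_of_sq_le i x hle
        have hnd' : ∀ q, 2 ≤ q → q < i + 1 → ¬ q ∣ x := by
          intro q hq2 hqi hqd
          rcases lt_or_eq_of_le (by omega : q ≤ i) with hcase | hcase
          · exact hnd q hq2 hcase hqd
          · subst hcase
            exact hdvd ((PySem.Int.mod_eq_zero_iff_dvd x q).mpr hqd)
        obtain ⟨p, hp2, hpd, hmin, heq⟩ := ih (i + 1) (by omega) (by omega) hnd'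
        exact ⟨p, hp2, hpd, hmin, by rw [spfGo, if_pos hle, if_neg hdvd]; exact heq⟩
    · refine ⟨x, hx, dvd_refl x, ?_, ?_⟩
      · intro q hq2 hqd
        by_contra hqx
        rw [not_le] at hqx
        obtain ⟨r, hr⟩ := hqd
        have hr1 : 1 ≤ r := by nlinarith
        have hrne : r ≠ 1 := by
          intro h
          subst h
          simp at hr
          omega
        have hr2 : 2 ≤ r := by omega
        have hxi : x < i * i := not_le.mp hle
        by_cases hqq : q * q ≤ x
        · have hqi : q < i := by nlinarith
          exact hnd q hq2 hqi ⟨r, hr⟩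
        · rw [not_le] at hqq
          have hrq : r < q := by nlinarith
          have hrr : r * r ≤ x := by nlinarith
          have hri : r < i := by nlinarith
          exact hnd r hr2 hri ⟨q, by rw [hr]; ring⟩
      · rw [spfGo, if_neg hle, Int.ediv_self (by omega)]

-- ===== VERDICT (by name: the statement is the Claim_ definition above) =====
theorem maximize_spec : Claim_equal_maximize := by
  intro x _
  unfold Spec_maximize maximize maximize_alt
  by_cases hx : x < 2
  · rw [if_pos hx, PySem.List.pyRange_one_eq_nil (by omega)]
    rfl
  · rw [not_lt] at hx
    rw [if_neg (by omega)]
    obtain ⟨p, hp2, hpd, hmin, heq⟩ :=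
      spfGo_spec x hx x.toNat 2 le_rfl (by omega) (by intro q hq2 hq; omega)
    rw [heq]
    set d := x / p with hd
    have hdp : p * d = x := Int.mul_ediv_cancel' hpd
    have hd1 : 1 ≤ d := by nlinarith
    have hdm : d ≤ x - d := by nlinarith
    set m0 := x - d with hm0
    have hm01 : 1 ≤ m0 := by omega
    have hm0x : m0 < x := by omega
    -- gcd m0 x = d
    have hgm : (Int.gcd m0 x : Int) = d := by
      have hdx : d ∣ x := ⟨p, by rw [← hdp]; ring⟩
      have hdm0 : d ∣ m0 := by
        have hsub : d ∣ x - d := dvd_sub hdx (dvd_refl d)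
        rw [hm0]
        exact hsub
      have h1 : d ∣ (Int.gcd m0 x : Int) := dvd_gcd_int m0 x d hdm0 hdx
      have h2 : (Int.gcd m0 x : Int) ∣ d := by
        have hga : (Int.gcd m0 x : Int) ∣ m0 := Int.gcd_dvd_left m0 x
        have hgb : (Int.gcd m0 x : Int) ∣ x := Int.gcd_dvd_right m0 x
        have hsub : (Int.gcd m0 x : Int) ∣ x - m0 := dvd_sub hgb hga
        have hxm : x - m0 = d := by omega
        rwa [hxm] at hsub
      exact Int.dvd_antisymm (by positivity) (by omega) h2 h1
    -- every sum gcd(y,x)+y with y < m0 stays strictly below x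
    have hlt : ∀ y ∈ PySem.List.pyRange 1 m0 1, mdc y x + y < x := by
      intro y hy
      rw [PySem.List.mem_pyRange_one] at hy
      rw [mdc_eq_gcd y x (by omega) (by omega)]
      rcases lt_or_eq_of_le (sum_le x y (by omega) (by omega)) with h | h
      · exact h
      · exfalso
        have hgx : (Int.gcd y x : Int) ∣ x := Int.gcd_dvd_right y x
        have hg1 : 1 ≤ (Int.gcd y x : Int) := by omega
        have hglt : (Int.gcd y x : Int) < x := by omega
        have := proper_div_le x p (Int.gcd y x : Int) hx hp2 hpd hmin hg1 hgx hglt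
        omega
    -- split the range at m0
    rw [PySem.List.pyRange_one_append 1 m0 x (by omega) (by omega),
        PySem.List.pyRange_one_cons hm0x, List.foldl_append, List.foldl_cons]
    set s' := (PySem.List.pyRange 1 m0 1).foldl (stepA x) (0, 0) with hs'
    have hpre : s'.1 < x := fold_lt x _ hlt (0, 0) (by omega)
    -- the step at m0 sets the state to (x, m0)
    have hstep : stepA x s' m0 = (x, m0) := by
      rw [stepA_eq, mdc_eq_gcd m0 x (by omega) (by omega), hgm,
          if_pos (by omega : d + m0 > s'.1)]
      congr 1
      omega
    rw [hstep]
    -- suffix: no sum exceeds x, the state stays (x, m0)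
    rw [fold_const x m0 _ ?_]
    intro y hy
    rw [PySem.List.mem_pyRange_one] at hy
    rw [mdc_eq_gcd y x (by omega) (by omega)]
    exact sum_le x y (by omega) (by omega)
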